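-- pv_equiv track=rewrite | github.com/eskerda/renfe-skill | renfe_skill/cli.py | _train_label
-- ===== SOURCE A (Python) =====
-- def _train_label(trip_id: str, train_numbers: set[str]) -> str:
--     """Extract a human-readable train number from a trip_id."""
--     for num in sorted(train_numbers, key=len, reverse=True):
--         if num in trip_id:
--             return num
--     for num in sorted(train_numbers, key=len, reverse=True):
--         if trip_id.startswith(num):
--             return num
--     return trip_id
-- ===== SOURCE B (Python) =====
-- def _train_label(trip_id: str, train_numbers: set[str]) -> str:
--     """Extract a human-readable train number from a trip_id."""
--     cands = [num for num in train_numbers if num in trip_id]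
--     return max(cands, key=len) if cands else trip_id
-- ===== Notes on version B (the rewrite author's own statement) =====
-- stated objective: simpler
-- what changed: Replaces the descending length-sort plus two sequential scan loops (the second is dead, since startswith implies substring membership) with a single filter pass over train_numbers followed by max(key=len), whose first-maximal tie-break reproduces the stable sort's order.
import Mathlib
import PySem

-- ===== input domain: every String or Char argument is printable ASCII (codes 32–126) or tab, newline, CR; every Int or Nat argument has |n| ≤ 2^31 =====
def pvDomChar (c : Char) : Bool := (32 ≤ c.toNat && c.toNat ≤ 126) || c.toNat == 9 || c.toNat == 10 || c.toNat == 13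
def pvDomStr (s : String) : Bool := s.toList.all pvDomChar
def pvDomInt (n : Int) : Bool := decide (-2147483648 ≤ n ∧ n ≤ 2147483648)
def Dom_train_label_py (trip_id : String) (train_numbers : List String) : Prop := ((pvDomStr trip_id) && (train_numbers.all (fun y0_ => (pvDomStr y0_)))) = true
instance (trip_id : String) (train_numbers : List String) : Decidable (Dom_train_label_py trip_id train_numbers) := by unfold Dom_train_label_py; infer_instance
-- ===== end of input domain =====

-- B replaces A's descending length-sort plus two scan loops (the second is dead code,
-- since startswith implies substring membership) with one filter pass and a first-maximal
-- max by length; objective: simpler.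

-- ===== PORT A =====
-- first loop: 'for num in sorted(...): if num in trip_id: return num'
def tlpLoop1 (trip_id : String) : List String → Option String
  | [] => none
  | num :: rest =>
    if PySem.Str.isIn num trip_id then some num else tlpLoop1 trip_id rest

-- second loop: 'for num in sorted(...): if trip_id.startswith(num): return num'
def tlpLoop2 (trip_id : String) : List String → Option String
  | [] => none
  | num :: rest =>
    if PySem.Str.startswith trip_id num then some num else tlpLoop2 trip_id rest

def train_label_py (trip_id : String) (train_numbers : List String) : String :=
  match tlpLoop1 trip_id (PySem.List.sorted train_numbers (fun n => PySem.Str.len n) true) with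
  | some num => num
  | none =>
    match tlpLoop2 trip_id (PySem.List.sorted train_numbers (fun n => PySem.Str.len n) true) with
    | some num => num
    | none => trip_id

-- ===== PORT B =====
-- cands = [num for num in train_numbers if num in trip_id]; max(cands, key=len) if cands else trip_id
def train_label_py_alt (trip_id : String) (train_numbers : List String) : String :=
  match PySem.List.max? (train_numbers.filter (fun num => PySem.Str.isIn num trip_id))
      (fun n => PySem.Str.len n) with
  | some m => m
  | none => trip_id

-- ===== PRECONDITION & SPEC =====
def Spec_train_label_py (trip_id : String) (train_numbers : List String) (out : String) : Prop := out = train_label_py_alt trip_id train_numbers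
instance (trip_id : String) (train_numbers : List String) (out : String) : Decidable (Spec_train_label_py trip_id train_numbers out) := by unfold Spec_train_label_py; infer_instance

-- ===== CLAIM (what is proved, stated in full; the proofs are below) =====
def Claim_equal_train_label_py : Prop := ∀ (trip_id : String) (train_numbers : List String), Dom_train_label_py trip_id train_numbers → Spec_train_label_py trip_id train_numbers (train_label_py trip_id train_numbers)

-- ===== LEMMAS AND PROOFS =====

theorem tlpLoop1_eq_find? (trip_id : String) (l : List String) :
    tlpLoop1 trip_id l = l.find? (fun num => PySem.Str.isIn num trip_id) := by
  induction l with
  | nil => rfl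
  | cons y ys ih =>
    unfold tlpLoop1
    by_cases h : PySem.Str.isIn y trip_id = true
    · rw [List.find?_cons_of_pos (p := fun num => PySem.Str.isIn num trip_id) h, if_pos h]
    · rw [List.find?_cons_of_neg (p := fun num => PySem.Str.isIn num trip_id) h, if_neg h, ih]

theorem tlpLoop2_eq_find? (trip_id : String) (l : List String) :
    tlpLoop2 trip_id l = l.find? (fun num => PySem.Str.startswith trip_id num) := by
  induction l with
  | nil => rfl
  | cons y ys ih =>
    unfold tlpLoop2
    by_cases h : PySem.Str.startswith trip_id y = true
    · rw [List.find?_cons_of_pos (p := fun num => PySem.Str.startswith trip_id num) h, if_pos h]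
    · rw [List.find?_cons_of_neg (p := fun num => PySem.Str.startswith trip_id num) h, if_neg h, ih]

theorem startswith_imp_isIn (trip_id num : String)
    (h : PySem.Str.startswith trip_id num = true) : PySem.Str.isIn num trip_id = true := by
  rw [PySem.Str.isIn_iff_infix]
  have hp : num.toList <+: trip_id.toList :=
    (PySem.Chars.startswith_iff trip_id.toList num.toList).mp (by simpa using h)
  exact hp.isInfix

-- inserting x with insertBy (key b < key a) into a key-descending list interacts with
-- find? exactly as the running-max step of max?
theorem ins_find {α κ : Type} [LinearOrder κ] (key : α → κ) (p : α → Bool) (x : α) :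
    ∀ (l : List α), l.Pairwise (fun a b => key b ≤ key a) →
    (PySem.List.insertBy (fun a b => decide (key b < key a)) x l).find? p =
      if p x then
        (match l.find? p with
          | none => some x
          | some m => if key m < key x then some x else some m)
      else l.find? p := by
  intro l
  induction l with
  | nil =>
    intro _
    by_cases hx : p x = true
    · rw [if_pos hx]
      simp [PySem.List.insertBy, List.find?_cons_of_pos hx]
    · rw [if_neg hx]
      simp [PySem.List.insertBy, List.find?_cons_of_neg hx]
  | cons y ys ih =>
    intro hp
    have hys : ys.Pairwise (fun a b => key b ≤ key a) := hp.tail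
    have hhead : ∀ z ∈ ys, key z ≤ key y := fun z hz => (List.pairwise_cons.mp hp).1 z hz
    by_cases hlt : key y < key x
    · -- x is inserted in front of y
      have hins : PySem.List.insertBy (fun a b => decide (key b < key a)) x (y :: ys) = x :: y :: ys := by
        simp [PySem.List.insertBy, hlt]
      rw [hins]
      by_cases hx : p x = true
      · rw [List.find?_cons_of_pos hx, if_pos hx]
        cases hfy : (y :: ys).find? p with
        | none => rfl
        | some m =>
          have hm : m ∈ y :: ys := List.mem_of_find?_eq_some hfy
          have hmk : key m ≤ key y := by
            rcases List.mem_cons.mp hm with h | h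
            · simp [h]
            · exact hhead m h
          simp [lt_of_le_of_lt hmk hlt]
      · rw [List.find?_cons_of_neg hx, if_neg hx]
    · -- x is inserted after y
      have hins : PySem.List.insertBy (fun a b => decide (key b < key a)) x (y :: ys) =
          y :: PySem.List.insertBy (fun a b => decide (key b < key a)) x ys := by
        simp [PySem.List.insertBy, hlt]
      rw [hins]
      by_cases hy : p y = true
      · rw [List.find?_cons_of_pos hy, List.find?_cons_of_pos hy]
        by_cases hx : p x = true
        · simp [hx, hlt]
        · rw [if_neg hx]
      · rw [List.find?_cons_of_neg hy, List.find?_cons_of_neg hy, ih hys]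

-- the core equivalence: the first match in the stable descending sort is the first
-- key-maximal element of the filtered list
theorem find_sorted_eq_max {α κ : Type} [LinearOrder κ] (key : α → κ) (p : α → Bool) (l : List α) :
    (PySem.List.sorted l key true).find? p = PySem.List.max? (l.filter p) key := by
  induction l using List.reverseRecOn with
  | nil => rfl
  | append_singleton l x ih =>
    have hsorted : PySem.List.sorted (l ++ [x]) key true =
        PySem.List.insertBy (fun a b => decide (key b < key a)) x (PySem.List.sorted l key true) := by
      rw [PySem.List.sorted_rev_eq_foldl_insertBy, List.foldl_append,
        ← PySem.List.sorted_rev_eq_foldl_insertBy]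
      rfl
    rw [hsorted, ins_find key p x _ (PySem.List.sorted_pairwise_rev l key), ih]
    by_cases hx : p x = true
    · rw [if_pos hx]
      simp only [List.filter_append, List.filter_cons, hx, if_pos, List.filter_nil,
        PySem.List.max?, List.foldl_append]
      rfl
    · rw [if_neg hx]
      simp [List.filter_append, hx]

-- ===== VERDICT (by name: the statement is the Claim_ definition above) =====
theorem train_label_py_spec : Claim_equal_train_label_py := by
  intro trip_id train_numbers _
  unfold Spec_train_label_py train_label_py train_label_py_alt
  rw [tlpLoop1_eq_find?, tlpLoop2_eq_find?,
    find_sorted_eq_max (fun n => PySem.Str.len n) (fun num => PySem.Str.isIn num trip_id)]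
  cases hmax : PySem.List.max? (train_numbers.filter (fun num => PySem.Str.isIn num trip_id))
      (fun n => PySem.Str.len n) with
  | some m => rfl
  | none =>
    have hfilter : train_numbers.filter (fun num => PySem.Str.isIn num trip_id) = [] :=
      (PySem.List.max?_eq_none_iff _ _).mp hmax
    -- no candidate matches, so the second (startswith) scan finds nothing either
    have hfind2 : (PySem.List.sorted train_numbers (fun n => PySem.Str.len n) true).find?
        (fun num => PySem.Str.startswith trip_id num) = none := by
      rw [List.find?_eq_none]
      intro n hn hsw
      have hmem : n ∈ train_numbers := (PySem.List.mem_sorted _ _ _ _).mp hn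
      have hin : n ∈ train_numbers.filter (fun num => PySem.Str.isIn num trip_id) :=
        List.mem_filter.mpr ⟨hmem, startswith_imp_isIn trip_id n (by simpa using hsw)⟩
      rw [hfilter] at hin
      exact absurd hin (List.not_mem_nil)
    rw [hfind2]
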